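-- pv_equiv track=rewrite | github.com/PPPPParadise/Danone-international-label-advanced-forecast | src/forecaster/utilitaires.py | substract_period
-- ===== SOURCE A (Python) =====
-- def substract_period(date, add, highest_period: int=52):
--     i = 0
--     while i < add:
--         if date % 100 != 1:
--             date -= 1
--         else:
--             date = ((date//100)-1)*100 + highest_period
--         i += 1
--     return date
-- ===== SOURCE B (Python) =====
-- def substract_period(date, add, highest_period: int = 52):
--     # Walk back one wrap at a time: batch all plain decrements down to the
--     # next period-1 boundary into one subtraction, then wrap to the previous
--     # year's highest period.
--     while add > 0:
--         k = (date % 100 - 1) % 100          # decrements left before the period field reads 1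
--         if add <= k:
--             return date - add
--         date = ((date - k) // 100 - 1) * 100 + highest_period
--         add -= k + 1
--     return date
-- ===== Notes on version B (the rewrite author's own statement) =====
-- stated objective: faster
-- what changed: Replaces the one-step-per-period while loop by a per-wrap loop: all plain decrements down to the next period-1 boundary are batched into a single subtraction, so the loop runs once per year wrap instead of once per period.
import Mathlib
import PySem

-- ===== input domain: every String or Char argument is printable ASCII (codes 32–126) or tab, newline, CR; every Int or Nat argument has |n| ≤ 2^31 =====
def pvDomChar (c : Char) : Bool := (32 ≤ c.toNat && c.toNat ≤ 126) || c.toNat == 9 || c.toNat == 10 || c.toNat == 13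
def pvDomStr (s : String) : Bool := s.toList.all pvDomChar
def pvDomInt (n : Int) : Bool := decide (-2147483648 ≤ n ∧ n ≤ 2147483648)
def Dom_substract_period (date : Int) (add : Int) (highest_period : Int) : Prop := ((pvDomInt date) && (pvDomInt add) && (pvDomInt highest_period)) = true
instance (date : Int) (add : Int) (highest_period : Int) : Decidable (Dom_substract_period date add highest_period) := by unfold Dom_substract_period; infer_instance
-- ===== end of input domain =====

-- B replaces A's one-step-per-period loop by a per-wrap loop that batches all
-- plain decrements down to the next period-1 boundary into one subtraction.

-- ===== PORT A =====
-- the while loop: 'while i < add' with i counting up runs max(add,0) times, counted down structurally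
def spALoop (highest_period : Int) (date : Int) : Nat → Int
  | 0 => date
  | n + 1 =>
    spALoop highest_period
      (if PySem.Int.mod date 100 ≠ 1 then date - 1
       else (PySem.Int.floordiv date 100 - 1) * 100 + highest_period)
      n

def substract_period (date : Int) (add : Int) (highest_period : Int) : Int :=
  spALoop highest_period date add.toNat

-- ===== PORT B =====
-- the per-wrap while loop; each pass consumes k + 1 ≥ 1 of add, so add.toNat passes of fuel suffice
def spBLoop (highest_period : Int) : Nat → Int → Int → Int
  | 0, date, _ => date
  | fuel + 1, date, add =>
    if 0 < add then
      let k := PySem.Int.mod (PySem.Int.mod date 100 - 1) 100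
      if add ≤ k then date - add
      else
        spBLoop highest_period fuel
          ((PySem.Int.floordiv (date - k) 100 - 1) * 100 + highest_period)
          (add - (k + 1))
    else date

def substract_period_alt (date : Int) (add : Int) (highest_period : Int) : Int :=
  spBLoop highest_period add.toNat date add

-- ===== PRECONDITION & SPEC =====
def Spec_substract_period (date : Int) (add : Int) (highest_period : Int) (out : Int) : Prop := out = substract_period_alt date add highest_period
instance (date : Int) (add : Int) (highest_period : Int) (out : Int) : Decidable (Spec_substract_period date add highest_period out) := by unfold Spec_substract_period; infer_instance

-- ===== CLAIM (what is proved, stated in full; the proofs are below) =====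
def Claim_equal_substract_period : Prop := ∀ (date : Int) (add : Int) (highest_period : Int), Dom_substract_period date add highest_period → Spec_substract_period date add highest_period (substract_period date add highest_period)

-- ===== LEMMAS AND PROOFS =====

-- the loop body of A as a pure step function (Python's % and // with positive divisor 100 are Lean's emod/ediv)
def spStep (highest_period : Int) (d : Int) : Int :=
  if d % 100 ≠ 1 then d - 1 else (d / 100 - 1) * 100 + highest_period

theorem spStep_eq (hp d : Int) :
    (if PySem.Int.mod d 100 ≠ 1 then d - 1
     else (PySem.Int.floordiv d 100 - 1) * 100 + hp) = spStep hp d := by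
  rw [spStep, PySem.Int.mod_eq_emod_of_pos (by norm_num : (0:Int) < 100),
      PySem.Int.floordiv_eq_ediv_of_pos (by norm_num : (0:Int) < 100)]

theorem spALoop_iterate (hp : Int) (n : Nat) :
    ∀ date : Int, spALoop hp date n = (spStep hp)^[n] date := by
  induction n with
  | zero => intro date; rfl
  | succ n ih =>
    intro date
    rw [spALoop, ih, spStep_eq, ← Function.iterate_succ_apply]

-- while the period field does not read 1, each A-step is a plain decrement
theorem spStep_iterate_dec (hp : Int) (j : Nat) :
    ∀ d : Int, (j : Int) ≤ (d % 100 - 1) % 100 → (spStep hp)^[j] d = d - j := by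
  induction j with
  | zero => intro d _; simp
  | succ j ih =>
    intro d hd
    have h1 : d % 100 ≠ 1 := by omega
    rw [Function.iterate_succ_apply, spStep, if_pos h1, ih (d - 1) (by omega)]
    push_cast; ring

-- each pass of B's loop equals k + 1 A-steps; fuel ≥ add suffices
theorem spBLoop_iterate (hp : Int) (fuel : Nat) :
    ∀ (date add : Int), add ≤ (fuel : Int) →
      spBLoop hp fuel date add = (spStep hp)^[add.toNat] date := by
  induction fuel with
  | zero =>
    intro date add h
    have : add.toNat = 0 := by omega
    rw [spBLoop, this]; rfl
  | succ fuel ih =>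
    intro date add h
    rw [spBLoop]
    by_cases h0 : 0 < add
    · rw [if_pos h0]
      simp only [PySem.Int.mod_eq_emod_of_pos (show (0:Int) < 100 by norm_num),
        PySem.Int.floordiv_eq_ediv_of_pos (show (0:Int) < 100 by norm_num)]
      set k : Int := (date % 100 - 1) % 100 with hk
      have hk0 : 0 ≤ k ∧ k < 100 := by constructor <;> omega
      by_cases h1 : add ≤ k
      · rw [if_pos h1, spStep_iterate_dec hp add.toNat date (by omega)]
        omega
      · rw [if_neg h1, ih _ _ (by omega)]
        have hsplit : add.toNat = (add - (k + 1)).toNat + (k.toNat + 1) := by omega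
        rw [hsplit, Function.iterate_add_apply]
        congr 1
        rw [Function.iterate_succ_apply', spStep_iterate_dec hp k.toNat date (by omega)]
        have hkc : (k.toNat : Int) = k := by omega
        rw [hkc, spStep, if_neg (by omega)]
    · rw [if_neg h0]
      have : add.toNat = 0 := by omega
      rw [this]; rfl

theorem substract_period_spec : Claim_equal_substract_period := by
  intro date add hp _
  unfold Spec_substract_period substract_period substract_period_alt
  rw [spALoop_iterate, spBLoop_iterate hp add.toNat date add (by omega)]
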